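-- pv_equiv track=rewrite | github.com/ppipil/potato-novel | backend/app/main.py | _choice_effects
-- ===== SOURCE A (Python) =====
-- def _choice_effects(style: str) -> dict[str, dict[str, int]]:
--     """根据选项风格生成默认的人格与关系数值影响。"""
--     persona_effect = {"真诚": 0, "嘴硬": 0, "心机": 0, "胆量": 0}
--     relationship_effect = {"好感": 0, "信任": 0, "警惕": 0}
--
--     if style in {"soft", "support", "trust"}:
--         persona_effect["真诚"] += 1
--         relationship_effect["好感"] += 1
--         relationship_effect["信任"] += 1
--     elif style == "tease":
--         persona_effect["胆量"] += 1
--         relationship_effect["好感"] += 1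
--     elif style == "confrontation":
--         persona_effect["嘴硬"] += 1
--         persona_effect["胆量"] += 1
--         relationship_effect["警惕"] += 1
--     elif style in {"strategy", "manipulation"}:
--         persona_effect["心机"] += 1
--         relationship_effect["警惕"] += 1
--     elif style == "observation":
--         persona_effect["心机"] += 1
--     elif style == "risk":
--         persona_effect["胆量"] += 1
--         relationship_effect["警惕"] += 1
--
--     return {
--         "persona": {key: value for key, value in persona_effect.items() if value},
--         "relationship": {key: value for key, value in relationship_effect.items() if value},
--     }
-- ===== SOURCE B (Python) =====
-- _SOFT = ({"真诚": 1}, {"好感": 1, "信任": 1})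
-- _STRAT = ({"心机": 1}, {"警惕": 1})
--
-- # style -> (persona deltas, relationship deltas), keys already in the canonical
-- # base-dict order (真诚,嘴硬,心机,胆量 / 好感,信任,警惕), only nonzero entries.
-- STYLE_EFFECTS = {
--     "soft": _SOFT,
--     "support": _SOFT,
--     "trust": _SOFT,
--     "tease": ({"胆量": 1}, {"好感": 1}),
--     "confrontation": ({"嘴硬": 1, "胆量": 1}, {"警惕": 1}),
--     "strategy": _STRAT,
--     "manipulation": _STRAT,
--     "observation": ({"心机": 1}, {}),
--     "risk": ({"胆量": 1}, {"警惕": 1}),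
-- }
--
--
-- def _choice_effects(style: str) -> dict[str, dict[str, int]]:
--     persona, relationship = STYLE_EFFECTS.get(style, ({}, {}))
--     return {"persona": dict(persona), "relationship": dict(relationship)}
-- ===== Notes on version B (the rewrite author's own statement) =====
-- stated objective: simpler
-- what changed: Replaced the branch chain that mutates two zero-initialised counter dicts and then filters out zeros with a single constant lookup table mapping each style directly to its precomputed nonzero effect dicts.
import Mathlib
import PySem

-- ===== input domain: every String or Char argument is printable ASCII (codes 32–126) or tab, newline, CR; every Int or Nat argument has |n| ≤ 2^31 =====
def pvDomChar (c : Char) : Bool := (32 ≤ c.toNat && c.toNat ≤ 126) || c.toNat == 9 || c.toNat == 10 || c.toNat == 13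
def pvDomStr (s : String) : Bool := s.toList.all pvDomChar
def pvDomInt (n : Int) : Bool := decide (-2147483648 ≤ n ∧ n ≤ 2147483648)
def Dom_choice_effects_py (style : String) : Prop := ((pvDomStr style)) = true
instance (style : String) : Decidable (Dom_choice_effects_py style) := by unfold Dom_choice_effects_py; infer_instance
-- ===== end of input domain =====

-- B replaces the mutate-then-filter branch chain by a constant style->effects lookup table (objective: simpler).\n-- ===== PORT A =====
def choice_effects_py (style : String) : List (String × List (String × Int)) :=
  let persona : PySem.Dict String Int :=
    PySem.Dict.mk [("真诚", 0), ("嘴硬", 0), ("心机", 0), ("胆量", 0)]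
  let rel : PySem.Dict String Int :=
    PySem.Dict.mk [("好感", 0), ("信任", 0), ("警惕", 0)]
  let pr : PySem.Dict String Int × PySem.Dict String Int :=
    if style = "soft" ∨ style = "support" ∨ style = "trust" then
      (persona.modify "真诚" 0 (· + 1),
       (rel.modify "好感" 0 (· + 1)).modify "信任" 0 (· + 1))
    else if style = "tease" then
      (persona.modify "胆量" 0 (· + 1), rel.modify "好感" 0 (· + 1))
    else if style = "confrontation" then
      ((persona.modify "嘴硬" 0 (· + 1)).modify "胆量" 0 (· + 1),
       rel.modify "警惕" 0 (· + 1))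
    else if style = "strategy" ∨ style = "manipulation" then
      (persona.modify "心机" 0 (· + 1), rel.modify "警惕" 0 (· + 1))
    else if style = "observation" then
      (persona.modify "心机" 0 (· + 1), rel)
    else if style = "risk" then
      (persona.modify "胆量" 0 (· + 1), rel.modify "警惕" 0 (· + 1))
    else (persona, rel)
  [("persona", pr.1.items.filter (fun kv => kv.2 ≠ 0)),
   ("relationship", pr.2.items.filter (fun kv => kv.2 ≠ 0))]

-- ===== PORT B =====
def styleEffects : PySem.Dict String (List (String × Int) × List (String × Int)) :=
  PySem.Dict.mk
    [("soft", ([("真诚", 1)], [("好感", 1), ("信任", 1)])),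
     ("support", ([("真诚", 1)], [("好感", 1), ("信任", 1)])),
     ("trust", ([("真诚", 1)], [("好感", 1), ("信任", 1)])),
     ("tease", ([("胆量", 1)], [("好感", 1)])),
     ("confrontation", ([("嘴硬", 1), ("胆量", 1)], [("警惕", 1)])),
     ("strategy", ([("心机", 1)], [("警惕", 1)])),
     ("manipulation", ([("心机", 1)], [("警惕", 1)])),
     ("observation", ([("心机", 1)], [])),
     ("risk", ([("胆量", 1)], [("警惕", 1)]))]

def choice_effects_py_alt (style : String) : List (String × List (String × Int)) :=
  let pr := styleEffects.getD style ([], [])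
  [("persona", pr.1), ("relationship", pr.2)]

-- ===== PRECONDITION & SPEC =====
def Spec_choice_effects_py (style : String) (out : List (String × List (String × Int))) : Prop := out = choice_effects_py_alt style
instance (style : String) (out : List (String × List (String × Int))) : Decidable (Spec_choice_effects_py style out) := by unfold Spec_choice_effects_py; infer_instance

-- ===== CLAIM (what is proved, stated in full; the proofs are below) =====
def Claim_equal_choice_effects_py : Prop := ∀ (style : String), Dom_choice_effects_py style → Spec_choice_effects_py style (choice_effects_py style)

-- ===== LEMMAS AND PROOFS =====

-- ===== VERDICT (by name: the statement is the Claim_ definition above) =====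
theorem choice_effects_py_spec : Claim_equal_choice_effects_py := by
  intro style _
  unfold Spec_choice_effects_py
  by_cases h1 : style = "soft"
  · subst h1; rfl
  by_cases h2 : style = "support"
  · subst h2; rfl
  by_cases h3 : style = "trust"
  · subst h3; rfl
  by_cases h4 : style = "tease"
  · subst h4; rfl
  by_cases h5 : style = "confrontation"
  · subst h5; rfl
  by_cases h6 : style = "strategy"
  · subst h6; rfl
  by_cases h7 : style = "manipulation"
  · subst h7; rfl
  by_cases h8 : style = "observation"
  · subst h8; rfl
  by_cases h9 : style = "risk"
  · subst h9; rfl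
  have g1 : (("soft" : String) == style) = false := beq_eq_false_iff_ne.mpr (Ne.symm h1)
  have g2 : (("support" : String) == style) = false := beq_eq_false_iff_ne.mpr (Ne.symm h2)
  have g3 : (("trust" : String) == style) = false := beq_eq_false_iff_ne.mpr (Ne.symm h3)
  have g4 : (("tease" : String) == style) = false := beq_eq_false_iff_ne.mpr (Ne.symm h4)
  have g5 : (("confrontation" : String) == style) = false := beq_eq_false_iff_ne.mpr (Ne.symm h5)
  have g6 : (("strategy" : String) == style) = false := beq_eq_false_iff_ne.mpr (Ne.symm h6)
  have g7 : (("manipulation" : String) == style) = false := beq_eq_false_iff_ne.mpr (Ne.symm h7)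
  have g8 : (("observation" : String) == style) = false := beq_eq_false_iff_ne.mpr (Ne.symm h8)
  have g9 : (("risk" : String) == style) = false := beq_eq_false_iff_ne.mpr (Ne.symm h9)
  simp [choice_effects_py, choice_effects_py_alt, styleEffects, PySem.Dict.getD,
        PySem.Dict.get?, List.find?, h1, h2, h3, h4, h5, h6, h7, h8, h9,
        g1, g2, g3, g4, g5, g6, g7, g8, g9]
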